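-- pv_equiv track=rewrite | github.com/daniel880423/Member_System | file/hw1/1090425/s1090425_0.py | homework_1
-- ===== SOURCE A (Python) =====
-- def homework_1(nums): # 請同學記得把檔案名稱改成自己的學號(ex.1104813.py)
--     count_lst = []
--     r = 0
--     try:
--         for i, num in enumerate(nums):
--             if num == nums[i+1]:
--                 r += 1
--             else:
--                 r += 1
--                 count_lst.append(r)
--                 r = 0
--     except IndexError:
--         r += 1
--         count_lst.append(r)
--         return max(count_lst)
-- ===== SOURCE B (Python) =====
-- def homework_1(nums):
--     # Single look-behind pass keeping a running maximum; no run-length list,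
--     # no index lookahead, no exception handling.
--     best = None
--     run = 0
--     prev = None
--     for x in nums:
--         run = run + 1 if prev == x else 1
--         prev = x
--         if best is None or run > best:
--             best = run
--     return best
-- ===== Notes on version B (the rewrite author's own statement) =====
-- stated objective: simpler
-- what changed: A scans with index lookahead (nums[i+1]), collects every run length in a list and takes max() inside an IndexError handler; B does a look-behind pass comparing each element to the previous one and keeps only a running maximum, with no list, no indexing and no exception.
import Mathlib
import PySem

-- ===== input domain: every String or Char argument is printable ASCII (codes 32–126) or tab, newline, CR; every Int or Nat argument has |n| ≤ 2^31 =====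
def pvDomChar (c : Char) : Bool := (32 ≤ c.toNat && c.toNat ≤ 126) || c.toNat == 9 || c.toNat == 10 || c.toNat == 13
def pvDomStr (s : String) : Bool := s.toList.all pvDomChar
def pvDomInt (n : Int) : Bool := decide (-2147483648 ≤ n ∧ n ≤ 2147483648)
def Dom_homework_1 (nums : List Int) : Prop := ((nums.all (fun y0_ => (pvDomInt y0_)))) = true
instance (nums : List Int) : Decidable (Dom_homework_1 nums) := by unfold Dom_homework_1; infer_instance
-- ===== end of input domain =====

-- B replaces A's lookahead-and-collect scan (run lengths appended to a list, max() taken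
-- in an IndexError handler) by a look-behind pass that keeps only a running maximum (simpler).

-- ===== PORT A =====
-- the for-loop over enumerate(nums); nums stays available for the nums[i+1] lookahead;
-- the 'none' lookup result is Python's IndexError caught by the except branch
def hwGoA (nums : List Int) : List (Int × Int) → List Int → Int → Option Int
  | [], _, _ => none
  | (i, num) :: rest, count_lst, r =>
    match PySem.List.pyGet? nums (i + 1) with
    | some nxt =>
      if num = nxt then hwGoA nums rest count_lst (r + 1)
      else hwGoA nums rest (count_lst ++ [r + 1]) 0
    | none => PySem.List.max? (count_lst ++ [r + 1]) (fun y => y)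

def homework_1 (nums : List Int) : Option Int :=
  hwGoA nums (PySem.List.enumerate nums 0) [] 0

-- ===== PORT B =====
def altGo : List Int → Option Int → Int → Option Int → Option Int
  | [], best, _, _ => best
  | x :: rest, best, run, prev =>
    let run' := if prev = some x then run + 1 else 1
    let best' : Option Int :=
      match best with
      | none => some run'
      | some b => some (if run' > b then run' else b)
    altGo rest best' run' (some x)

def homework_1_alt (nums : List Int) : Option Int :=
  altGo nums none 0 none

-- ===== PRECONDITION & SPEC =====
def Spec_homework_1 (nums : List Int) (out : Option Int) : Prop := out = homework_1_alt nums
instance (nums : List Int) (out : Option Int) : Decidable (Spec_homework_1 nums out) := by unfold Spec_homework_1; infer_instance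

-- ===== CLAIM (what is proved, stated in full; the proofs are below) =====
def Claim_equal_homework_1 : Prop := ∀ (nums : List Int), Dom_homework_1 nums → Spec_homework_1 nums (homework_1 nums)

-- ===== LEMMAS AND PROOFS =====

-- A with the enumerate/lookahead machinery eliminated: the same loop on the plain suffix
def gA : List Int → List Int → Int → Option Int
  | [], _, _ => none
  | [_], cl, r => PySem.List.max? (cl ++ [r + 1]) (fun y => y)
  | num :: nxt :: tail, cl, r =>
    if num = nxt then gA (nxt :: tail) cl (r + 1)
    else gA (nxt :: tail) (cl ++ [r + 1]) 0

lemma hwGoA_eq_gA : ∀ (suf pre cl : List Int) (r : Int),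
    hwGoA (pre ++ suf) (PySem.List.enumerate suf (pre.length : Int)) cl r = gA suf cl r := by
  intro suf
  induction suf with
  | nil => intro pre cl r; simp [PySem.List.enumerate_nil, hwGoA, gA]
  | cons num rest ih =>
    intro pre cl r
    rw [PySem.List.enumerate_cons]
    have hget : PySem.List.pyGet? (pre ++ num :: rest) ((pre.length : Int) + 1)
        = (num :: rest)[1]? := by
      have := PySem.List.pyGet?_append_right (pre := pre) (ys := num :: rest) (k := 1)
      simpa using this
    cases rest with
    | nil =>
      simp [hwGoA, gA, hget]
    | cons nxt tail =>
      have hget' : PySem.List.pyGet? (pre ++ num :: nxt :: tail) ((pre.length : Int) + 1)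
          = some nxt := by simpa using hget
      have hpre : pre ++ num :: nxt :: tail = (pre ++ [num]) ++ nxt :: tail := by simp
      have hlen : (pre.length : Int) + 1 = ((pre ++ [num]).length : Int) := by
        simp
      simp only [hwGoA, hget', gA]
      by_cases h : num = nxt
      · simp only [if_pos h]
        rw [hlen, hpre, ih]
      · simp only [if_neg h]
        rw [hlen, hpre, ih]

-- one-step unfolding of altGo that rw can apply exactly once
lemma altGo_cons (x : Int) (rest : List Int) (best : Option Int) (run : Int) (prev : Option Int) :
    altGo (x :: rest) best run prev =
      altGo rest
        (match best with
          | none => some (if prev = some x then run + 1 else 1)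
          | some b => some (if (if prev = some x then run + 1 else 1) > b
                            then (if prev = some x then run + 1 else 1) else b))
        (if prev = some x then run + 1 else 1) (some x) := rfl

lemma foldl_max_exch (cl : List Int) (a b : Int) :
    List.foldl max (max a b) cl = max (List.foldl max a cl) b := by
  induction cl generalizing a with
  | nil => rfl
  | cons c t ih =>
    simp only [List.foldl_cons]
    rw [max_right_comm, ih]

lemma max?_append_singleton (cl : List Int) (v : Int) :
    PySem.List.max? (cl ++ [v]) (fun y => y) = some (List.foldl max v cl) := by
  cases cl with
  | nil => simp [PySem.List.max?_id_cons]
  | cons c t =>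
    rw [List.cons_append, PySem.List.max?_id_cons, List.foldl_append]
    simp only [List.foldl_nil, List.foldl_cons]
    rw [max_comm v c, foldl_max_exch]

lemma self_le_foldl_max (cl : List Int) (a : Int) : a ≤ List.foldl max a cl :=
  (PySem.List.le_foldl_max cl a).1

lemma mem_le_foldl_max (cl : List Int) (a y : Int) (hy : y ∈ cl) : y ≤ List.foldl max a cl :=
  (PySem.List.le_foldl_max cl a).2 y hy

lemma max_eq_ite (b v : Int) : (if v > b then v else b) = max b v := by
  rcases le_or_gt v b with h | h
  · rw [max_eq_left h, if_neg (not_lt.mpr h)]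
  · rw [max_eq_right h.le, if_pos h]

lemma foldl_max_key (cl : List Int) (run run' : Int) (h : run ≤ List.foldl max run' cl) :
    List.foldl max run' cl = max (List.foldl max run cl) run' := by
  have h1 : List.foldl max (max run' run) cl = max (List.foldl max run' cl) run :=
    foldl_max_exch cl run' run
  have h2 : List.foldl max (max run run') cl = max (List.foldl max run cl) run' :=
    foldl_max_exch cl run run'
  rw [max_comm run run', h1] at h2
  exact (max_eq_left h).symm.trans h2

-- drop a just-appended value from the accumulator of the fold
lemma foldl_max_append_self (cl : List Int) (v : Int) :
    List.foldl max v (cl ++ [v]) = List.foldl max v cl := by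
  rw [List.foldl_append]
  simp [max_eq_left (self_le_foldl_max cl v)]

-- the loop invariant: entering element x, A's pending counter r is B's current run
-- length when x continues the previous run and 0 otherwise; completed runs are in cl;
-- B's best is the max of cl and the current run
lemma gA_main : ∀ (tail : List Int) (x : Int) (cl : List Int) (run r : Int) (p : Option Int),
    r = (if p = some x then run else 0) →
    (p ≠ some x → run ∈ cl) →
    gA (x :: tail) cl r = altGo (x :: tail) (some (List.foldl max run cl)) run p := by
  intro tail
  induction tail with
  | nil =>
    intro x cl run r p hr hmem
    set run' := if p = some x then run + 1 else 1 with hrun'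
    have hr1 : r + 1 = run' := by
      by_cases hp : p = some x <;> simp [hr, hrun', hp]
    have hle : run ≤ List.foldl max run' cl := by
      by_cases hp : p = some x
      · have h1 : run ≤ run' := by rw [hrun', if_pos hp]; omega
        exact le_trans h1 (self_le_foldl_max cl run')
      · exact mem_le_foldl_max cl run' run (hmem hp)
    have hbest : List.foldl max run' cl = max (List.foldl max run cl) run' :=
      foldl_max_key cl run run' hle
    rw [show gA [x] cl r = PySem.List.max? (cl ++ [r + 1]) (fun y => y) from rfl,
        altGo_cons, max?_append_singleton, hr1]
    simp only [altGo]
    rw [max_eq_ite, hbest]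
  | cons y t ih =>
    intro x cl run r p hr hmem
    set run' := if p = some x then run + 1 else 1 with hrun'
    have hr1 : r + 1 = run' := by
      by_cases hp : p = some x <;> simp [hr, hrun', hp]
    have hle : run ≤ List.foldl max run' cl := by
      by_cases hp : p = some x
      · have h1 : run ≤ run' := by rw [hrun', if_pos hp]; omega
        exact le_trans h1 (self_le_foldl_max cl run')
      · exact mem_le_foldl_max cl run' run (hmem hp)
    have hbest : List.foldl max run' cl = max (List.foldl max run cl) run' :=
      foldl_max_key cl run run' hle
    rw [altGo_cons]
    simp only []
    rw [max_eq_ite, ← hbest]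
    rw [show gA (x :: y :: t) cl r
          = if x = y then gA (y :: t) cl (r + 1) else gA (y :: t) (cl ++ [r + 1]) 0 from rfl]
    by_cases hxy : x = y
    · rw [if_pos hxy, hr1]
      exact ih y cl run' run' (some x)
        (by rw [if_pos (by rw [hxy])]) (fun hc => absurd (by rw [hxy]) hc)
    · rw [if_neg hxy, hr1]
      have := ih y (cl ++ [run']) run' 0 (some x)
        (by rw [if_neg (by simpa using hxy)]) (fun _ => by simp)
      rw [this, foldl_max_append_self]

lemma homework_1_eq_gA (nums : List Int) : homework_1 nums = gA nums [] 0 := by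
  have := hwGoA_eq_gA nums [] [] 0
  simpa [homework_1] using this

-- ===== VERDICT (by name: the statement is the Claim_ definition above) =====
theorem homework_1_spec : Claim_equal_homework_1 := by
  unfold Claim_equal_homework_1
  intro nums _
  unfold Spec_homework_1 homework_1_alt
  rw [homework_1_eq_gA]
  cases nums with
  | nil => rfl
  | cons x tail =>
    cases tail with
    | nil =>
      rw [show gA [x] [] 0 = PySem.List.max? ([] ++ [(0:Int) + 1]) (fun y => y) from rfl,
          max?_append_singleton]
      rfl
    | cons y t =>
      -- peel the first iteration of both loops by hand
      have hB1 : altGo (x :: y :: t) none 0 none = altGo (y :: t) (some 1) 1 (some x) := rfl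
      have hA1 : gA (x :: y :: t) [] 0
          = if x = y then gA (y :: t) [] 1 else gA (y :: t) [1] 0 := by
        show (if x = y then gA (y :: t) [] (0 + 1) else gA (y :: t) ([] ++ [0 + 1]) 0) = _
        norm_num
      rw [hA1, hB1]
      by_cases hxy : x = y
      · rw [if_pos hxy]
        have := gA_main t y [] 1 1 (some x) (by simp [hxy]) (by simp [hxy])
        simpa using this
      · rw [if_neg hxy]
        have := gA_main t y [1] 1 0 (some x) (by simp [hxy]) (fun _ => by simp)
        simpa using this
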